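-- pv_equiv track=rewrite | github.com/enrique-z/researcher | PIPELINE_2_DEVELOPMENT/ai_researcher_enhanced/integration/oxford_web_search_connector.py | _classify_result_type
-- ===== SOURCE A (Python) =====
-- def _classify_result_type(title: str) -> str:
--     """Classify result type based on title."""
--     title_lower = title.lower()
--
--     if any(term in title_lower for term in ["journal", "paper", "study", "research", "publication"]):
--         return "academic"
--     elif any(term in title_lower for term in ["expert", "scientist", "researcher", "professor"]):
--         return "expert"
--     elif any(term in title_lower for term in ["news", "report", "update", "breaking"]):
--         return "news"
--     else:
--         return "general"
-- ===== SOURCE B (Python) =====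
-- # Position-scan: walk the lowered title once, matching keywords at each offset
-- # and keeping the minimum rule priority seen; map the best priority to a category.
-- _KEYWORDS = [
--     ("journal", 0), ("paper", 0), ("study", 0), ("research", 0), ("publication", 0),
--     ("expert", 1), ("scientist", 1), ("researcher", 1), ("professor", 1),
--     ("news", 2), ("report", 2), ("update", 2), ("breaking", 2),
-- ]
-- _CATS = {0: "academic", 1: "expert", 2: "news"}
--
-- def _classify_result_type(title: str) -> str:
--     t = title.lower()
--     best = 3
--     for i in range(len(t)):
--         for kw, p in _KEYWORDS:
--             if p < best and t.startswith(kw, i):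
--                 best = p
--     return _CATS.get(best, "general")
-- ===== Notes on version B (the rewrite author's own statement) =====
-- stated objective: alternative
-- what changed: Replaced per-keyword substring tests in an if/elif chain by a single left-to-right scan of the lowered title that matches all keywords at each position and accumulates the minimum rule priority, mapped to a category at the end.
import Mathlib
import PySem

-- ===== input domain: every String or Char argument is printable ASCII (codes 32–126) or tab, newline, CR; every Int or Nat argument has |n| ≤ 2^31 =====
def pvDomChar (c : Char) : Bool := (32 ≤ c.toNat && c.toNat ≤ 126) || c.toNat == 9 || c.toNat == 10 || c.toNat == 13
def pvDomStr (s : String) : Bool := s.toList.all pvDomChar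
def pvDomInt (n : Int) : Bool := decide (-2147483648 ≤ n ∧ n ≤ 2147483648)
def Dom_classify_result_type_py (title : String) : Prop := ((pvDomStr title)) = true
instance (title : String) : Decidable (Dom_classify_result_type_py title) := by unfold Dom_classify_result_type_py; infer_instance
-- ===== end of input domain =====

-- B replaces A's per-keyword if/elif substring tests by a single left-to-right scan of the
-- lowered title that matches all keywords at each position and keeps the minimum rule priority.


-- ===== PORT A =====
def classify_result_type_py (title : String) : String :=
  let title_lower := PySem.Str.lower title
  if ["journal", "paper", "study", "research", "publication"].any
      (fun term => PySem.Str.isIn term title_lower) then "academic"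
  else if ["expert", "scientist", "researcher", "professor"].any
      (fun term => PySem.Str.isIn term title_lower) then "expert"
  else if ["news", "report", "update", "breaking"].any
      (fun term => PySem.Str.isIn term title_lower) then "news"
  else "general"

-- ===== PORT B =====
def pvKeywords : List (List Char × Nat) :=
  [("journal".toList, 0), ("paper".toList, 0), ("study".toList, 0), ("research".toList, 0),
   ("publication".toList, 0),
   ("expert".toList, 1), ("scientist".toList, 1), ("researcher".toList, 1), ("professor".toList, 1),
   ("news".toList, 2), ("report".toList, 2), ("update".toList, 2), ("breaking".toList, 2)]

def pvCats : PySem.Dict Nat String :=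
  PySem.Dict.ofList [((0 : Nat), "academic"), (1, "expert"), (2, "news")]

-- inner loop of B: try every keyword at the current position (suffix s), keep the best priority
def pvBestAt (s : List Char) (best : Nat) : Nat :=
  pvKeywords.foldl
    (fun b kp => if kp.2 < b ∧ PySem.Chars.startswith s kp.1 = true then kp.2 else b) best

-- outer loop of B: walk the positions of the lowered title (suffixes of its char list)
def pvScan : List Char → Nat → Nat
  | [], best => best
  | c :: rest, best => pvScan rest (pvBestAt (c :: rest) best)

def classify_result_type_py_alt (title : String) : String :=
  let t := (PySem.Str.lower title).toList
  PySem.Dict.getD pvCats (pvScan t 3) "general"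

-- ===== PRECONDITION & SPEC =====
def Spec_classify_result_type_py (title : String) (out : String) : Prop := out = classify_result_type_py_alt title
instance (title : String) (out : String) : Decidable (Spec_classify_result_type_py title out) := by unfold Spec_classify_result_type_py; infer_instance

-- ===== CLAIM =====
def Claim_equal_classify_result_type_py : Prop := ∀ (title : String), Dom_classify_result_type_py title → Spec_classify_result_type_py title (classify_result_type_py title)

-- ===== LEMMAS AND PROOFS =====

def pvGrpA : List (List Char) :=
  ["journal".toList, "paper".toList, "study".toList, "research".toList, "publication".toList]
def pvGrpE : List (List Char) :=
  ["expert".toList, "scientist".toList, "researcher".toList, "professor".toList]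
def pvGrpN : List (List Char) :=
  ["news".toList, "report".toList, "update".toList, "breaking".toList]

def pvAnySw (g : List (List Char)) (s : List Char) : Bool :=
  g.any (fun kw => PySem.Chars.startswith s kw)
def pvAnyIn (g : List (List Char)) (t : List Char) : Bool :=
  g.any (fun kw => PySem.Chars.isIn kw t)

def pvChain (x0 x1 x2 : Bool) : Nat :=
  if x0 then 0 else if x1 then 1 else if x2 then 2 else 3

lemma pvKeywords_eq :
    pvKeywords = pvGrpA.map (fun k => (k, 0)) ++ pvGrpE.map (fun k => (k, 1))
      ++ pvGrpN.map (fun k => (k, 2)) := by decide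

lemma pv_grpfold (s : List Char) (g : List (List Char)) (p : Nat) : ∀ b : Nat,
    ((g.map (fun k => (k, p))).foldl
      (fun b kp => if kp.2 < b ∧ PySem.Chars.startswith s kp.1 = true then kp.2 else b) b)
      = if pvAnySw g s then min b p else b := by
  induction g with
  | nil => intro b; simp [pvAnySw]
  | cons k rest ih =>
    intro b
    simp only [List.map_cons, List.foldl_cons]
    cases h : PySem.Chars.startswith s k with
    | false =>
      have e : (if p < b ∧ false = true then p else b) = b := by simp
      rw [e, ih]
      simp [pvAnySw, List.any_cons, h]
    | true =>
      have e : (if p < b ∧ true = true then p else b) = min b p := by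
        simp only [eq_self_iff_true, and_true, Nat.min_def]
        split_ifs <;> omega
      have hall : pvAnySw (k :: rest) s = true := by simp [pvAnySw, h]
      rw [e, ih, hall, if_pos rfl]
      by_cases hr : pvAnySw rest s = true
      · rw [if_pos hr, min_assoc, min_self]
      · rw [if_neg hr]

lemma pvBestAt_eq (s : List Char) (b : Nat) (hb : b ≤ 3) :
    pvBestAt s b = min b (pvChain (pvAnySw pvGrpA s) (pvAnySw pvGrpE s) (pvAnySw pvGrpN s)) := by
  unfold pvBestAt
  rw [pvKeywords_eq, List.foldl_append, List.foldl_append, pv_grpfold, pv_grpfold, pv_grpfold]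
  unfold pvChain
  cases pvAnySw pvGrpA s <;> cases pvAnySw pvGrpE s <;> cases pvAnySw pvGrpN s <;> simp <;> omega

lemma pvChain_min (x0 x1 x2 y0 y1 y2 : Bool) :
    min (pvChain x0 x1 x2) (pvChain y0 y1 y2)
      = pvChain (x0 || y0) (x1 || y1) (x2 || y2) := by
  revert x0 x1 x2 y0 y1 y2; decide

lemma pv_isIn_cons (kw : List Char) (c : Char) (r : List Char) :
    PySem.Chars.isIn kw (c :: r)
      = (PySem.Chars.startswith (c :: r) kw || PySem.Chars.isIn kw r) := by
  cases h : PySem.Chars.startswith (c :: r) kw with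
  | true =>
    simp only [Bool.true_or]
    rw [PySem.Chars.isIn_iff_infix]
    exact List.infix_cons_iff.mpr (Or.inl ((PySem.Chars.startswith_iff _ _).mp h))
  | false =>
    cases h2 : PySem.Chars.isIn kw r with
    | true =>
      simp only [Bool.false_or]
      rw [PySem.Chars.isIn_iff_infix] at h2 ⊢
      exact List.infix_cons_iff.mpr (Or.inr h2)
    | false =>
      simp only [Bool.or_self]
      rw [PySem.Chars.isIn_eq_false_iff] at h2 ⊢
      rw [Bool.eq_false_iff] at h
      intro hinf
      rcases List.infix_cons_iff.mp hinf with hp | hi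
      · exact h ((PySem.Chars.startswith_iff _ _).mpr hp)
      · exact h2 hi

lemma pvAnyIn_cons (g : List (List Char)) (c : Char) (r : List Char) :
    pvAnyIn g (c :: r) = (pvAnySw g (c :: r) || pvAnyIn g r) := by
  induction g with
  | nil => simp [pvAnyIn, pvAnySw]
  | cons k rest ih =>
    simp only [pvAnyIn, pvAnySw, List.any_cons] at *
    rw [pv_isIn_cons, ih]
    cases PySem.Chars.startswith (c :: r) k <;> cases PySem.Chars.isIn k r <;> simp

lemma pvChain_le (x0 x1 x2 : Bool) : pvChain x0 x1 x2 ≤ 3 := by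
  unfold pvChain; split_ifs <;> omega

lemma pvScan_eq (t : List Char) : ∀ b : Nat, b ≤ 3 →
    pvScan t b = min b (pvChain (pvAnyIn pvGrpA t) (pvAnyIn pvGrpE t) (pvAnyIn pvGrpN t)) := by
  induction t with
  | nil =>
    intro b hb
    have h : pvChain (pvAnyIn pvGrpA []) (pvAnyIn pvGrpE []) (pvAnyIn pvGrpN []) = 3 := by decide
    simp [pvScan, h]; omega
  | cons c r ih =>
    intro b hb
    have hle : pvBestAt (c :: r) b ≤ 3 := by
      rw [pvBestAt_eq _ _ hb]; omega
    show pvScan r (pvBestAt (c :: r) b)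
        = min b (pvChain (pvAnyIn pvGrpA (c :: r)) (pvAnyIn pvGrpE (c :: r)) (pvAnyIn pvGrpN (c :: r)))
    rw [ih _ hle, pvBestAt_eq _ _ hb, min_assoc, pvChain_min,
      pvAnyIn_cons, pvAnyIn_cons, pvAnyIn_cons]

-- ===== VERDICT =====
theorem classify_result_type_py_spec : Claim_equal_classify_result_type_py := by
  intro title _
  unfold Spec_classify_result_type_py classify_result_type_py classify_result_type_py_alt
  simp only [List.any_cons, List.any_nil, PySem.Str.isIn_eq, PySem.Str.toList_lower]
  rw [pvScan_eq _ 3 (by omega), Nat.min_eq_right (pvChain_le _ _ _)]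
  have hA : pvAnyIn pvGrpA (PySem.Chars.lower title.toList)
      = (PySem.Chars.isIn "journal".toList (PySem.Chars.lower title.toList) ||
         (PySem.Chars.isIn "paper".toList (PySem.Chars.lower title.toList) ||
         (PySem.Chars.isIn "study".toList (PySem.Chars.lower title.toList) ||
         (PySem.Chars.isIn "research".toList (PySem.Chars.lower title.toList) ||
         (PySem.Chars.isIn "publication".toList (PySem.Chars.lower title.toList) || false))))) := by
    simp [pvAnyIn, pvGrpA]
  have hE : pvAnyIn pvGrpE (PySem.Chars.lower title.toList)
      = (PySem.Chars.isIn "expert".toList (PySem.Chars.lower title.toList) ||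
         (PySem.Chars.isIn "scientist".toList (PySem.Chars.lower title.toList) ||
         (PySem.Chars.isIn "researcher".toList (PySem.Chars.lower title.toList) ||
         (PySem.Chars.isIn "professor".toList (PySem.Chars.lower title.toList) || false)))) := by
    simp [pvAnyIn, pvGrpE]
  have hN : pvAnyIn pvGrpN (PySem.Chars.lower title.toList)
      = (PySem.Chars.isIn "news".toList (PySem.Chars.lower title.toList) ||
         (PySem.Chars.isIn "report".toList (PySem.Chars.lower title.toList) ||
         (PySem.Chars.isIn "update".toList (PySem.Chars.lower title.toList) ||
         (PySem.Chars.isIn "breaking".toList (PySem.Chars.lower title.toList) || false)))) := by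
    simp [pvAnyIn, pvGrpN]
  rw [← hA, ← hE, ← hN]
  cases pvAnyIn pvGrpA (PySem.Chars.lower title.toList) <;>
    cases pvAnyIn pvGrpE (PySem.Chars.lower title.toList) <;>
    cases pvAnyIn pvGrpN (PySem.Chars.lower title.toList) <;>
    simp [pvChain] <;> rfl
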